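-- pv_equiv track=rewrite | github.com/Techbarsha/GFG-POTD | 23 May 2024  K-Palindrome.py | kPalindrome
-- ===== SOURCE A (Python) =====
-- def kPalindrome(str, n, k):
--     # code here
--     reverse_str = str[::-1]
--
--     # Create a dp array to store the lengths of LCS
--     dp = [[0] * (n + 1) for _ in range(n + 1)]
--
--     # Fill the dp array
--     for i in range(1, n + 1):
--         for j in range(1, n + 1):
--             if str[i - 1] == reverse_str[j - 1]:
--                 dp[i][j] = dp[i - 1][j - 1] + 1
--             else:
--                 dp[i][j] = max(dp[i - 1][j], dp[i][j - 1])
--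
--     # The minimum deletions required to make the string a palindrome
--     min_deletions = n - dp[n][n]
--
--     # Check if the minimum deletions required is less than or equal to k
--     if min_deletions <= k:
--         return 1
--     else:
--         return 0
-- ===== SOURCE B (Python) =====
-- def kPalindrome(str, n, k):
--     # Suffix decision DP: LCS(x[i:], y[j:]) = max(skip x[i],
--     # 1 + value after the first occurrence of x[i] in y[j:]).
--     x = str[:n]
--     y = str[::-1][:n]
--     g = [0] * (n + 1)            # g[j] = LCS(x[i:], y[j:]) for the current suffix of x
--     for c in x[::-1]:
--         ng = [0] * (n + 1)
--         p = None                 # index of the first occurrence of c in y[j:]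
--         for j in range(n - 1, -1, -1):
--             if y[j] == c:
--                 p = j
--             best = g[j]
--             if p is not None and 1 + g[p + 1] > best:
--                 best = 1 + g[p + 1]
--             ng[j] = best
--         g = ng
--     return 1 if n - g[0] <= k else 0
-- ===== Notes on version B (the rewrite author's own statement) =====
-- stated objective: alternative
-- what changed: Replaces the prefix LCS table with its 3-way cell recurrence (diag+1 / max of neighbours, O(n^2) index-addressed 2-D table) by a suffix decision DP: LCS(x[i:], y[j:]) = max(skip x[i], 1 + value after the first occurrence of x[i] in y[j:]), the first-occurrence pointer maintained by one backward scan per character; correct because matching a character at its earliest occurrence is always optimal.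
import Mathlib
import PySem

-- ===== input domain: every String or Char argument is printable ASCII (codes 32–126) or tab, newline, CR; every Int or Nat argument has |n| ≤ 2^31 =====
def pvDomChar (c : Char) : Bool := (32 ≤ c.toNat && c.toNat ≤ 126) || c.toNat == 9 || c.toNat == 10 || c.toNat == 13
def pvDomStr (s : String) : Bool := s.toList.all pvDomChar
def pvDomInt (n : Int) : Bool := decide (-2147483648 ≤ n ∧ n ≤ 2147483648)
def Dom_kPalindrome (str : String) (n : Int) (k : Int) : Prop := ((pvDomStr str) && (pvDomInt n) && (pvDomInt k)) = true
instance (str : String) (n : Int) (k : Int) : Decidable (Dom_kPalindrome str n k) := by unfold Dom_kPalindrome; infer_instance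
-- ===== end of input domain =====

-- B replaces A's prefix LCS table (3-way cell recurrence, diag+1 / max of neighbours) by a
-- suffix decision DP — LCS(x[i:], y[j:]) = max(skip x[i], 1 + value after the first occurrence
-- of x[i] in y[j:]) — with the first-occurrence pointer maintained by one backward scan per
-- character (objective: alternative).

-- ===== PORT A =====
def kPalindrome (str : String) (n : Int) (k : Int) : Int :=
  let cs := str.toList
  let reverse_str := (PySem.List.slice? cs none none (-1)).getD []
  let dp : List (List Int) :=
    (PySem.List.pyRange 0 (n + 1) 1).map (fun _ => PySem.List.pyRepeat [(0 : Int)] (n + 1))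
  let dp := (PySem.List.pyRange 1 (n + 1) 1).foldl (fun dp i =>
    (PySem.List.pyRange 1 (n + 1) 1).foldl (fun dp j =>
      let v : Int :=
        if PySem.List.pyGetD cs (i - 1) ' ' == PySem.List.pyGetD reverse_str (j - 1) ' ' then
          PySem.List.pyGetD (PySem.List.pyGetD dp (i - 1) []) (j - 1) 0 + 1
        else
          max (PySem.List.pyGetD (PySem.List.pyGetD dp (i - 1) []) j 0)
              (PySem.List.pyGetD (PySem.List.pyGetD dp i []) (j - 1) 0)
      PySem.List.pySetD dp i (PySem.List.pySetD (PySem.List.pyGetD dp i []) j v)) dp) dp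
  let min_deletions := n - PySem.List.pyGetD (PySem.List.pyGetD dp n []) n 0
  if min_deletions ≤ k then 1 else 0

-- ===== PORT B =====
def kPalindrome_alt (str : String) (n : Int) (k : Int) : Int :=
  let cs := str.toList
  let x := PySem.List.slice cs none (some n)
  let y := PySem.List.slice ((PySem.List.slice? cs none none (-1)).getD []) none (some n)
  let g0 := PySem.List.pyRepeat [(0 : Int)] (n + 1)
  let gf := ((PySem.List.slice? x none none (-1)).getD []).foldl (fun g c =>
    ((PySem.List.pyRange (n - 1) (-1) (-1)).foldl (fun (st : List Int × Option Int) j =>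
      let p : Option Int := if PySem.List.pyGetD y j ' ' == c then some j else st.2
      let best : Int := PySem.List.pyGetD g j 0
      let best : Int :=
        match p with
        | some pp =>
            if 1 + PySem.List.pyGetD g (pp + 1) 0 > best then 1 + PySem.List.pyGetD g (pp + 1) 0
            else best
        | none => best
      (PySem.List.pySetD st.1 j best, p))
      (PySem.List.pyRepeat [(0 : Int)] (n + 1), none)).1) g0
  if n - PySem.List.pyGetD gf 0 0 ≤ k then 1 else 0

-- ===== PRECONDITION & SPEC =====
-- Pre_ admits exactly the inputs on which A returns: for n < 0 or n > len(str) A raises IndexError.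
def Pre_kPalindrome (str : String) (n : Int) (k : Int) : Prop :=
  0 ≤ n ∧ n ≤ (str.toList.length : Int)
instance (str : String) (n : Int) (k : Int) : Decidable (Pre_kPalindrome str n k) := by
  unfold Pre_kPalindrome; infer_instance
def pvWitness_kPalindrome : String × Int × Int := ("abca", 4, 1)

def Spec_kPalindrome (str : String) (n : Int) (k : Int) (out : Int) : Prop := out = kPalindrome_alt str n k
instance (str : String) (n : Int) (k : Int) (out : Int) : Decidable (Spec_kPalindrome str n k out) := by unfold Spec_kPalindrome; infer_instance

-- ===== CLAIM (what is proved, stated in full; the proofs are below) =====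
def Claim_equal_kPalindrome : Prop := ∀ (str : String) (n : Int) (k : Int), Dom_kPalindrome str n k → Pre_kPalindrome str n k → Spec_kPalindrome str n k (kPalindrome str n k)

-- ===== LEMMAS AND PROOFS =====
-- One LCS row computed from the previous one (the row form of A's table update).
def pvRowAux (c : Char) : List Char → List Int → Int → Int → List Int
  | d :: rs, up :: ups, diag, left =>
    (if c == d then diag + 1 else if left ≤ up then up else left) ::
      pvRowAux c rs ups up (if c == d then diag + 1 else if left ≤ up then up else left)
  | _, _, _, _ => []

def pvStep (r : List Char) (prev : List Int) (c : Char) : List Int :=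
  0 :: pvRowAux c r (prev.drop 1) 0 0

theorem pvRowAux_length (c : Char) :
    ∀ (rs : List Char) (ups : List Int) (diag left : Int),
      (pvRowAux c rs ups diag left).length = min rs.length ups.length := by
  intro rs
  induction rs with
  | nil => intro ups diag left; simp [pvRowAux]
  | cons d rs ih =>
    intro ups diag left
    cases ups with
    | nil => simp [pvRowAux]
    | cons up ups => simp [pvRowAux, ih, Nat.succ_min_succ]

theorem pvRowAux_getD (c : Char) :
    ∀ (j : Nat) (rs : List Char) (ups : List Int) (diag left : Int),
      j < rs.length → j < ups.length →
      (pvRowAux c rs ups diag left).getD j 0 =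
        if c == rs.getD j ' ' then (diag :: ups).getD j 0 + 1
        else max (ups.getD j 0) ((left :: pvRowAux c rs ups diag left).getD j 0) := by
  intro j
  induction j with
  | zero =>
    intro rs ups diag left h1 h2
    cases rs with
    | nil => simp at h1
    | cons d rs =>
      cases ups with
      | nil => simp at h2
      | cons up ups =>
        simp only [pvRowAux, List.getD_cons_zero]
        split
        · rfl
        · by_cases hlu : left ≤ up
          · rw [if_pos hlu, max_eq_left hlu]
          · rw [if_neg hlu, max_eq_right ((not_le.mp hlu).le)]
  | succ j ih =>
    intro rs ups diag left h1 h2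
    cases rs with
    | nil => simp at h1
    | cons d rs =>
      cases ups with
      | nil => simp at h2
      | cons up ups =>
        simp only [pvRowAux, List.getD_cons_succ]
        rw [ih rs ups up _ (by simp at h1; omega) (by simp at h2; omega)]

theorem pvStep_getD (c : Char) (r : List Char) (ps : List Int)
    (hps : ps.length = r.length) (m : Nat) (hm : m < r.length) :
    (pvStep r (0 :: ps) c).getD (m + 1) 0 =
      if c == r.getD m ' ' then (0 :: ps).getD m 0 + 1
      else max (ps.getD m 0) ((pvStep r (0 :: ps) c).getD m 0) := by
  have h := pvRowAux_getD c m r ps 0 0 hm (by omega)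
  simp only [pvStep, List.drop_one, List.tail_cons, List.getD_cons_succ]
  rw [h]

theorem pvStep_shape (c : Char) (r : List Char) (ps : List Int) (hps : ps.length = r.length) :
    ∃ qs : List Int, pvStep r (0 :: ps) c = 0 :: qs ∧ qs.length = r.length := by
  refine ⟨_, rfl, ?_⟩
  simp [pvRowAux_length, hps]

theorem pvFold_shape (r : List Char) :
    ∀ (t : List Char) (p : List Int), (∃ ps, p = 0 :: ps ∧ ps.length = r.length) →
      ∃ qs, t.foldl (pvStep r) p = 0 :: qs ∧ qs.length = r.length := by
  intro t
  induction t with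
  | nil => intro p hp; simpa using hp
  | cons c t ih =>
    intro p hp
    obtain ⟨ps, rfl, hps⟩ := hp
    exact ih _ (pvStep_shape c r ps hps)

-- list indexing helpers
theorem pv_getD_append {α : Type} (xs : List α) (y : α) (ys : List α) (d : α) :
    (xs ++ y :: ys).getD xs.length d = y := by
  induction xs with
  | nil => rfl
  | cons x xs ih => exact ih

theorem pv_set_append {α : Type} (xs : List α) (y : α) (ys : List α) (v : α) :
    (xs ++ y :: ys).set xs.length v = xs ++ v :: ys := by
  induction xs with
  | nil => rfl
  | cons x xs ih => simp [ih]

theorem pv_getD_take {α : Type} [Inhabited α] (l : List α) (j k : Nat) (d : α) (h : k < j) :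
    (l.take j).getD k d = l.getD k d := by
  simp [List.getD_eq_getElem?_getD, List.getElem?_take_of_lt h]

-- A's inner j-loop as a named function (defeq to the lambda in the port of A).
def pvInnerBody (cs rev : List Char) (i : Int) (dp : List (List Int)) (j : Int) : List (List Int) :=
  let v : Int :=
    if PySem.List.pyGetD cs (i - 1) ' ' == PySem.List.pyGetD rev (j - 1) ' ' then
      PySem.List.pyGetD (PySem.List.pyGetD dp (i - 1) []) (j - 1) 0 + 1
    else
      max (PySem.List.pyGetD (PySem.List.pyGetD dp (i - 1) []) j 0)
          (PySem.List.pyGetD (PySem.List.pyGetD dp i []) (j - 1) 0)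
  PySem.List.pySetD dp i (PySem.List.pySetD (PySem.List.pyGetD dp i []) j v)

-- A's inner j-loop, from partial row m onwards, writes row number front.length+1.
theorem pvA_inner_go (cs rev r : List Char) (c : Char) (N : Nat)
    (front pads : List (List Int)) (ps : List Int)
    (hr : r.length = N) (hps : ps.length = N)
    (hc : PySem.List.pyGetD cs (front.length : Int) ' ' = c)
    (hrev : ∀ j : Nat, j < N → PySem.List.pyGetD rev (j : Int) ' ' = r.getD j ' ') :
    ∀ (m : Nat), m ≤ N →
      (PySem.List.pyRange ((m : Int) + 1) ((N : Int) + 1) 1).foldl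
        (pvInnerBody cs rev ((front.length : Int) + 1))
        (front ++ (0 :: ps) ::
          ((pvStep r (0 :: ps) c).take (m + 1) ++ (List.replicate (N + 1) (0 : Int)).drop (m + 1)) :: pads)
      = front ++ (0 :: ps) :: pvStep r (0 :: ps) c :: pads := by
  intro m hm
  have hnewlen : (pvStep r (0 :: ps) c).length = N + 1 := by
    simp [pvStep, pvRowAux_length, hps, hr]
  induction hfuel : N - m generalizing m with
  | zero =>
    have hmN : m = N := by omega
    subst hmN
    rw [PySem.List.pyRange_one_eq_nil (by omega), List.foldl_nil]
    rw [List.take_of_length_le (by omega), List.drop_eq_nil_of_le (by simp), List.append_nil]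
  | succ f ihf =>
    have hmN : m < N := by omega
    rw [PySem.List.pyRange_one_cons (by exact_mod_cast by omega), List.foldl_cons]
    set new := pvStep r (0 :: ps) c with hnew
    set part := new.take (m + 1) ++ (List.replicate (N + 1) (0 : Int)).drop (m + 1) with hpart
    have htklen : (new.take (m + 1)).length = m + 1 := by
      rw [List.length_take]; omega
    have hread1 :
        PySem.List.pyGetD (front ++ (0 :: ps) :: part :: pads) ((front.length : Int)) [] = 0 :: ps := by
      rw [PySem.List.pyGetD_natCast, pv_getD_append]
    have hread2 :
        PySem.List.pyGetD (front ++ (0 :: ps) :: part :: pads) ((front.length : Int) + 1) [] = part := by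
      have h1 : ((front.length : Int) + 1) = (((front.length + 1 : Nat)) : Int) := by push_cast; ring
      rw [h1, PySem.List.pyGetD_natCast]
      have h2 : front ++ (0 :: ps) :: part :: pads = (front ++ [0 :: ps]) ++ part :: pads := by simp
      rw [h2, show front.length + 1 = (front ++ [0 :: ps]).length by simp, pv_getD_append]
    have hj1 : ((m : Int) + 1) = (((m + 1 : Nat)) : Int) := by push_cast; ring
    have hgm : PySem.List.pyGetD (0 :: ps) (m : Int) 0 = (0 :: ps).getD m 0 := by
      rw [PySem.List.pyGetD_natCast]
    have hgm1 : PySem.List.pyGetD (0 :: ps) ((m : Int) + 1) 0 = ps.getD m 0 := by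
      rw [hj1, PySem.List.pyGetD_natCast, List.getD_cons_succ]
    have hgpart : PySem.List.pyGetD part (m : Int) 0 = new.getD m 0 := by
      rw [PySem.List.pyGetD_natCast, hpart,
        List.getD_append _ _ _ _ (by omega), pv_getD_take _ _ _ _ (by omega)]
    have hv :
        (if c == r.getD m ' ' then (0 :: ps).getD m 0 + 1
         else max (ps.getD m 0) (new.getD m 0))
        = new.getD (m + 1) 0 := by
      rw [hnew, pvStep_getD c r ps (by omega) m (by omega)]
    have hsetpart :
        PySem.List.pySetD part ((m : Int) + 1) (new.getD (m + 1) 0)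
          = new.take (m + 1 + 1) ++ (List.replicate (N + 1) (0 : Int)).drop (m + 1 + 1) := by
      rw [hj1, PySem.List.pySetD_natCast, hpart]
      have hdrop : (List.replicate (N + 1) (0 : Int)).drop (m + 1)
          = (0 : Int) :: (List.replicate (N + 1) (0 : Int)).drop (m + 1 + 1) := by
        rw [List.drop_replicate, List.drop_replicate]
        rw [show N + 1 - (m + 1) = (N + 1 - (m + 1 + 1)) + 1 by omega, List.replicate_succ]
      rw [hdrop]
      have hset := pv_set_append (new.take (m + 1)) (0 : Int)
        ((List.replicate (N + 1) (0 : Int)).drop (m + 1 + 1)) (new.getD (m + 1) 0)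
      rw [htklen] at hset
      rw [hset]
      have htake : new.take (m + 1 + 1) = new.take (m + 1) ++ [new.getD (m + 1) 0] := by
        rw [List.take_add_one, List.getElem?_eq_getElem (by omega),
          List.getD_eq_getElem _ _ (by omega)]
        rfl
      rw [htake, List.append_assoc, List.singleton_append]
    have hsetdp :
        PySem.List.pySetD (front ++ (0 :: ps) :: part :: pads) ((front.length : Int) + 1)
          (new.take (m + 1 + 1) ++ (List.replicate (N + 1) (0 : Int)).drop (m + 1 + 1))
        = front ++ (0 :: ps) ::
            (new.take (m + 1 + 1) ++ (List.replicate (N + 1) (0 : Int)).drop (m + 1 + 1)) :: pads := by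
      have h1 : ((front.length : Int) + 1) = (((front.length + 1 : Nat)) : Int) := by push_cast; ring
      rw [h1, PySem.List.pySetD_natCast]
      have h2 : front ++ (0 :: ps) :: part :: pads = (front ++ [0 :: ps]) ++ part :: pads := by simp
      rw [h2, show front.length + 1 = (front ++ [0 :: ps]).length by simp, pv_set_append]
      simp
    have hstep : pvInnerBody cs rev ((front.length : Int) + 1)
        (front ++ (0 :: ps) :: part :: pads) ((m : Int) + 1)
        = front ++ (0 :: ps) ::
            (new.take (m + 1 + 1) ++ (List.replicate (N + 1) (0 : Int)).drop (m + 1 + 1)) :: pads := by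
      simp only [pvInnerBody, add_sub_cancel_right, hread1, hread2, hc, hrev m hmN,
        hgm, hgm1, hgpart, hv, hsetpart, hsetdp]
    rw [hstep]
    have hcast2 : ((m : Int) + 1) + 1 = (((m + 1 : Nat)) : Int) + 1 := by push_cast; ring
    rw [hcast2]
    exact ihf (m + 1) (by omega) (by omega)

-- A's outer i-loop, from row m+1 onwards.
theorem pvA_outer (cs rev r t : List Char) (N : Nat)
    (hrlen : r.length = N) (htlen : t.length = N)
    (hct : ∀ j : Nat, j < N → PySem.List.pyGetD cs (j : Int) ' ' = t.getD j ' ')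
    (hrev : ∀ j : Nat, j < N → PySem.List.pyGetD rev (j : Int) ' ' = r.getD j ' ') :
    ∀ m : Nat, m ≤ N →
      (PySem.List.pyRange ((m : Int) + 1) ((N : Int) + 1) 1).foldl
        (fun dp i => (PySem.List.pyRange 1 ((N : Int) + 1) 1).foldl (pvInnerBody cs rev i) dp)
        ((List.range (m + 1)).map
            (fun i => (t.take i).foldl (pvStep r) (List.replicate (N + 1) (0 : Int)))
          ++ List.replicate (N - m) (List.replicate (N + 1) (0 : Int)))
      = (List.range (N + 1)).map
          (fun i => (t.take i).foldl (pvStep r) (List.replicate (N + 1) (0 : Int))) := by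
  intro m hm
  induction hfuel : N - m generalizing m with
  | zero =>
    have hmN : m = N := by omega
    rw [hmN]
    rw [show PySem.List.pyRange ((N : Int) + 1) ((N : Int) + 1) 1 = []
      from PySem.List.pyRange_one_eq_nil (by omega)]
    simp
  | succ f ihf =>
    have hmN : m < N := by omega
    rw [show PySem.List.pyRange ((m : Int) + 1) ((N : Int) + 1) 1
        = ((m : Int) + 1) :: PySem.List.pyRange ((m : Int) + 1 + 1) ((N : Int) + 1) 1
      from PySem.List.pyRange_one_cons (by exact_mod_cast by omega), List.foldl_cons]
    obtain ⟨ps, hRm, hpslen⟩ := pvFold_shape r (t.take m) (List.replicate (N + 1) (0 : Int))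
      ⟨List.replicate N 0, by rw [List.replicate_succ], by simp [hrlen]⟩
    obtain ⟨qs, hnewq, hqslen⟩ := pvStep_shape (t.getD m ' ') r ps (by omega)
    have hrows : (List.range (m + 1)).map
          (fun i => (t.take i).foldl (pvStep r) (List.replicate (N + 1) (0 : Int)))
        = (List.range m).map
            (fun i => (t.take i).foldl (pvStep r) (List.replicate (N + 1) (0 : Int))) ++ [0 :: ps] := by
      rw [List.range_succ, List.map_append, List.map_singleton, hRm]
    have hfrontlen : ((List.range m).map
        (fun i => (t.take i).foldl (pvStep r) (List.replicate (N + 1) (0 : Int)))).length = m := by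
      simp
    have hz0 : List.replicate (N + 1) (0 : Int)
        = (pvStep r (0 :: ps) (t.getD m ' ')).take 1
          ++ (List.replicate (N + 1) (0 : Int)).drop 1 := by
      rw [hnewq, List.replicate_succ]
      simp
    have hinner := pvA_inner_go cs rev r (t.getD m ' ') N
      ((List.range m).map (fun i => (t.take i).foldl (pvStep r) (List.replicate (N + 1) (0 : Int))))
      (List.replicate f (List.replicate (N + 1) (0 : Int))) ps hrlen (by omega)
      (by rw [hfrontlen, hct m hmN]) hrev 0 (by omega)
    rw [hfrontlen] at hinner
    simp only [Nat.cast_zero, zero_add] at hinner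
    have hstate : (List.range (m + 1)).map
          (fun i => (t.take i).foldl (pvStep r) (List.replicate (N + 1) (0 : Int)))
          ++ List.replicate (f + 1) (List.replicate (N + 1) (0 : Int))
        = (List.range m).map
            (fun i => (t.take i).foldl (pvStep r) (List.replicate (N + 1) (0 : Int)))
          ++ (0 :: ps) ::
            ((pvStep r (0 :: ps) (t.getD m ' ')).take 1
              ++ (List.replicate (N + 1) (0 : Int)).drop 1) ::
            List.replicate f (List.replicate (N + 1) (0 : Int)) := by
      rw [← hz0, hrows, List.append_assoc, List.singleton_append]
      rfl
    rw [hstate, hinner]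
    have hFm1 : pvStep r (0 :: ps) (t.getD m ' ')
        = (t.take (m + 1)).foldl (pvStep r) (List.replicate (N + 1) (0 : Int)) := by
      rw [List.take_add_one, List.getElem?_eq_getElem (by omega), List.foldl_append]
      rw [← hRm]
      rw [List.getD_eq_getElem _ _ (by omega)]
      rfl
    have hre : (List.range m).map
          (fun i => (t.take i).foldl (pvStep r) (List.replicate (N + 1) (0 : Int)))
          ++ (0 :: ps) :: pvStep r (0 :: ps) (t.getD m ' ')
            :: List.replicate f (List.replicate (N + 1) (0 : Int))
        = (List.range (m + 1 + 1)).map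
            (fun i => (t.take i).foldl (pvStep r) (List.replicate (N + 1) (0 : Int)))
          ++ List.replicate f (List.replicate (N + 1) (0 : Int)) := by
      rw [List.range_succ (n := m + 1), List.map_append, List.map_singleton, ← hFm1, hrows]
      simp
    rw [hre]
    have hcast2 : ((m : Int) + 1) + 1 = (((m + 1 : Nat)) : Int) + 1 := by push_cast; ring
    rw [hcast2]
    exact ihf (m + 1) (by omega) (by omega)

-- The outer loop lemma with A's literal lambda (defeq to pvInnerBody) and the replicate table.
theorem pvA_outer0 (cs rev r t : List Char) (N : Nat)
    (hrlen : r.length = N) (htlen : t.length = N)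
    (hct : ∀ j : Nat, j < N → PySem.List.pyGetD cs (j : Int) ' ' = t.getD j ' ')
    (hrev : ∀ j : Nat, j < N → PySem.List.pyGetD rev (j : Int) ' ' = r.getD j ' ') :
    (PySem.List.pyRange 1 ((N : Int) + 1) 1).foldl
      (fun dp i => (PySem.List.pyRange 1 ((N : Int) + 1) 1).foldl
        (fun dp j =>
          PySem.List.pySetD dp i
            (PySem.List.pySetD (PySem.List.pyGetD dp i []) j
              (if PySem.List.pyGetD cs (i - 1) ' ' == PySem.List.pyGetD rev (j - 1) ' ' then
                PySem.List.pyGetD (PySem.List.pyGetD dp (i - 1) []) (j - 1) 0 + 1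
              else
                max (PySem.List.pyGetD (PySem.List.pyGetD dp (i - 1) []) j 0)
                  (PySem.List.pyGetD (PySem.List.pyGetD dp i []) (j - 1) 0)))) dp)
      (List.replicate (N + 1) (List.replicate (N + 1) (0 : Int)))
    = (List.range (N + 1)).map
        (fun i => (t.take i).foldl (pvStep r) (List.replicate (N + 1) (0 : Int))) := by
  have h := pvA_outer cs rev r t N hrlen htlen hct hrev 0 (Nat.zero_le N)
  simp only [Nat.cast_zero, zero_add, Nat.sub_zero, List.range_one, List.map_cons, List.map_nil,
    List.take_zero, List.foldl_nil, List.singleton_append] at h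
  exact h
-- ===== semantic value: N is the maximum length of a common subsequence of u and v =====
def pvMC (u v : List Char) (N : Int) : Prop :=
  (∃ z : List Char, z.Sublist u ∧ z.Sublist v ∧ (z.length : Int) = N) ∧
  (∀ z : List Char, z.Sublist u → z.Sublist v → (z.length : Int) ≤ N)

theorem pvMC_unique {u v : List Char} {a b : Int} (ha : pvMC u v a) (hb : pvMC u v b) : a = b := by
  obtain ⟨⟨za, hza1, hza2, hza3⟩, hba⟩ := ha
  obtain ⟨⟨zb, hzb1, hzb2, hzb3⟩, hbb⟩ := hb
  have h1 := hbb za hza1 hza2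
  have h2 := hba zb hzb1 hzb2
  omega

theorem pvMC_nil_right (u : List Char) : pvMC u [] 0 := by
  constructor
  · exact ⟨[], List.nil_sublist u, List.Sublist.refl [], by simp⟩
  · intro z _ h2
    have h3 := List.sublist_nil.mp h2
    subst h3; simp

theorem pvMC_nil_left (v : List Char) : pvMC [] v 0 := by
  constructor
  · exact ⟨[], List.Sublist.refl [], List.nil_sublist v, by simp⟩
  · intro z h1 _
    have h3 := List.sublist_nil.mp h1
    subst h3; simp

theorem pv_sublist_snoc {z u : List Char} {c : Char} (h : z.Sublist (u ++ [c])) :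
    z.Sublist u ∨ ∃ z', z = z' ++ [c] ∧ z'.Sublist u := by
  rcases List.sublist_append_iff.mp h with ⟨x, y, rfl, hx, hy⟩
  rcases List.sublist_singleton.mp hy with rfl | rfl
  · left; simpa using hx
  · right; exact ⟨x, rfl, hx⟩

theorem pvMC_snoc_match {u v : List Char} {c : Char} {N : Int} (h : pvMC u v N) :
    pvMC (u ++ [c]) (v ++ [c]) (N + 1) := by
  obtain ⟨⟨z, hz1, hz2, hz3⟩, hb⟩ := h
  constructor
  · exact ⟨z ++ [c], hz1.append (List.Sublist.refl [c]), hz2.append (List.Sublist.refl [c]),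
      by simp; omega⟩
  · intro w hw1 hw2
    rcases pv_sublist_snoc hw1 with hwu | ⟨w', rfl, hw'⟩
    · rcases pv_sublist_snoc hw2 with hwv | ⟨w2, heq, hw2'⟩
      · have := hb w hwu hwv; omega
      · subst heq
        have hwu' : w2.Sublist u := (List.sublist_append_left w2 [c]).trans hwu
        have := hb w2 hwu' hw2'
        simp only [List.length_append, List.length_cons, List.length_nil]
        push_cast; omega
    · have hwv : (w' ++ [c]).Sublist (v ++ [c]) := hw2
      have hw'v : w'.Sublist v := by
        rcases pv_sublist_snoc hwv with h1 | ⟨w2, heq, hw2'⟩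
        · exact (List.sublist_append_left w' [c]).trans h1
        · have : w' = w2 := by
            have := congrArg List.dropLast heq
            simpa using this
          subst this; exact hw2'
      have := hb w' hw' hw'v
      simp only [List.length_append, List.length_cons, List.length_nil]
      push_cast; omega

theorem pvMC_snoc_mismatch {u v : List Char} {c d : Char} {A B : Int} (hcd : c ≠ d)
    (hA : pvMC u (v ++ [d]) A) (hB : pvMC (u ++ [c]) v B) :
    pvMC (u ++ [c]) (v ++ [d]) (max A B) := by
  obtain ⟨⟨za, ha1, ha2, ha3⟩, hba⟩ := hA
  obtain ⟨⟨zb, hb1, hb2, hb3⟩, hbb⟩ := hB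
  constructor
  · by_cases hab : A ≤ B
    · refine ⟨zb, hb1, hb2.trans (List.sublist_append_left v [d]), ?_⟩
      rw [max_eq_right hab]; exact hb3
    · refine ⟨za, ha1.trans (List.sublist_append_left u [c]), ha2, ?_⟩
      rw [max_eq_left (not_le.mp hab).le]; exact ha3
  · intro w hw1 hw2
    rcases pv_sublist_snoc hw1 with hwu | ⟨w', rfl, hw'⟩
    · exact le_trans (hba w hwu hw2) (le_max_left A B)
    · rcases pv_sublist_snoc hw2 with hwv | ⟨w2, heq, hw2'⟩
      · exact le_trans (hbb _ hw1 hwv) (le_max_right A B)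
      · exfalso
        apply hcd
        have h1 : (w' ++ [c]).getLast? = (w2 ++ [d]).getLast? := by rw [heq]
        rw [List.getLast?_concat, List.getLast?_concat] at h1
        exact Option.some_injective _ h1

theorem pvMC_cons_notmem {u v : List Char} {c : Char} {N : Int} (hc : c ∉ v) (h : pvMC u v N) :
    pvMC (c :: u) v N := by
  obtain ⟨⟨z, hz1, hz2, hz3⟩, hb⟩ := h
  refine ⟨⟨z, hz1.trans (List.sublist_cons_self c u), hz2, hz3⟩, ?_⟩
  intro w hw1 hw2
  rcases List.sublist_cons_iff.mp hw1 with hwu | ⟨r, rfl, hr⟩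
  · exact hb w hwu hw2
  · exact absurd (hw2.subset (List.mem_cons_self ..)) hc

theorem pv_first_occ {c : Char} : ∀ (v1 : List Char) {v2 z : List Char}, c ∉ v1 →
    (c :: z).Sublist (v1 ++ c :: v2) → z.Sublist v2 := by
  intro v1
  induction v1 with
  | nil =>
    intro v2 z _ h
    exact List.cons_sublist_cons.mp h
  | cons e v1 ih =>
    intro v2 z hc h
    rcases List.sublist_cons_iff.mp h with h' | ⟨r, heq, hr⟩
    · exact ih (fun hm => hc (List.mem_cons_of_mem e hm)) h'
    · exfalso
      apply hc
      have : c = e := by injection heq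
      rw [this]; exact List.mem_cons_self ..

theorem pvMC_cons_first {u v1 v2 : List Char} {c : Char} {A B : Int}
    (hc : c ∉ v1) (hA : pvMC u (v1 ++ c :: v2) A) (hB : pvMC u v2 B) :
    pvMC (c :: u) (v1 ++ c :: v2) (max A (1 + B)) := by
  obtain ⟨⟨za, ha1, ha2, ha3⟩, hba⟩ := hA
  obtain ⟨⟨zb, hb1, hb2, hb3⟩, hbb⟩ := hB
  constructor
  · by_cases hab : A ≤ 1 + B
    · refine ⟨c :: zb, List.cons_sublist_cons.mpr hb1,
        (List.cons_sublist_cons.mpr hb2).trans (List.sublist_append_right v1 (c :: v2)), ?_⟩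
      rw [max_eq_right hab]; simp; omega
    · refine ⟨za, ha1.trans (List.sublist_cons_self c u), ha2, ?_⟩
      rw [max_eq_left (not_le.mp hab).le]; exact ha3
  · intro w hw1 hw2
    rcases List.sublist_cons_iff.mp hw1 with hwu | ⟨r, rfl, hr⟩
    · exact le_trans (hba w hwu hw2) (le_max_left _ _)
    · have hrv : r.Sublist v2 := pv_first_occ v1 hc hw2
      have := hbb r hr hrv
      have h2 : (((c :: r).length : Nat) : Int) ≤ 1 + B := by simp; omega
      exact le_trans h2 (le_max_right _ _)

-- ===== A's rows compute maximum common subsequence lengths of prefixes =====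
theorem pvStep_MC (r : List Char) (u : List Char) (ps : List Int) (hps : ps.length = r.length)
    (c : Char)
    (hrow : ∀ j : Nat, j ≤ r.length → pvMC u (r.take j) ((0 :: ps).getD j 0)) :
    ∀ j : Nat, j ≤ r.length → pvMC (u ++ [c]) (r.take j) ((pvStep r (0 :: ps) c).getD j 0) := by
  intro j
  induction j with
  | zero =>
    intro _
    simpa [pvStep] using pvMC_nil_right (u ++ [c])
  | succ j ih =>
    intro hj
    have hjlt : j < r.length := by omega
    rw [pvStep_getD c r ps hps j hjlt]
    have htk : r.take (j + 1) = r.take j ++ [r.getD j ' '] := by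
      rw [List.take_add_one, List.getElem?_eq_getElem hjlt, List.getD_eq_getElem _ _ hjlt]
      rfl
    by_cases hcm : c = r.getD j ' '
    · rw [if_pos (by simpa using hcm), htk, ← hcm]
      exact pvMC_snoc_match (hrow j (le_of_lt hjlt))
    · rw [if_neg (by simpa using hcm), htk]
      have hA : pvMC u (r.take j ++ [r.getD j ' ']) ((0 :: ps).getD (j + 1) 0) := by
        rw [← htk]; exact hrow (j + 1) hj
      rw [List.getD_cons_succ] at hA
      exact pvMC_snoc_mismatch hcm hA (ih (le_of_lt hjlt))

theorem pvFold_MC (r : List Char) :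
    ∀ (t u : List Char) (ps : List Int), ps.length = r.length →
    (∀ j : Nat, j ≤ r.length → pvMC u (r.take j) ((0 :: ps).getD j 0)) →
    ∀ j : Nat, j ≤ r.length →
      pvMC (u ++ t) (r.take j) ((t.foldl (pvStep r) (0 :: ps)).getD j 0) := by
  intro t
  induction t with
  | nil => intro u ps hps hrow j hj; simpa using hrow j hj
  | cons c t iht =>
    intro u ps hps hrow j hj
    obtain ⟨qs, hq, hqlen⟩ := pvStep_shape c r ps hps
    rw [List.foldl_cons, hq]
    have h := iht (u ++ [c]) qs hqlen (by rw [← hq]; exact pvStep_MC r u ps hps c hrow) j hj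
    simpa using h

theorem pvA_MC (r t : List Char) :
    pvMC t r ((t.foldl (pvStep r) (List.replicate (r.length + 1) 0)).getD r.length 0) := by
  have h0 : ∀ j : Nat, j ≤ r.length →
      pvMC [] (r.take j) (((0 : Int) :: List.replicate r.length 0).getD j 0) := by
    intro j hj
    have hz : ((0 : Int) :: List.replicate r.length 0).getD j 0 = 0 := by
      cases j with
      | zero => rfl
      | succ j =>
        rw [List.getD_cons_succ]
        rcases lt_or_ge j r.length with h | h
        · rw [List.getD_eq_getElem _ _ (by simpa using h)]; simp
        · rw [List.getD_eq_default _ _ (by simpa using h)]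
    rw [hz]
    exact pvMC_nil_left _
  have h := pvFold_MC r t [] (List.replicate r.length 0) (by simp) h0 r.length le_rfl
  rw [List.take_length] at h
  simpa [List.replicate_succ] using h

-- ===== B's rows: the take-at-first-occurrence / skip decision =====
def pvBRow (r : List Char) (g : List Int) (c : Char) : List Int :=
  (List.range (r.length + 1)).map (fun j =>
    match List.findIdx? (fun d => d == c) (r.drop j) with
    | none => g.getD j 0
    | some q => max (g.getD j 0) (1 + g.getD (j + q + 1) 0))

theorem pv_getD_map_range (f : Nat → Int) (n j : Nat) (hj : j < n) :
    ((List.range n).map f).getD j 0 = f j := by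
  rw [List.getD_eq_getElem?_getD]
  simp [List.getElem?_map, List.getElem?_range hj]

theorem pvBRow_length (r : List Char) (g : List Int) (c : Char) :
    (pvBRow r g c).length = r.length + 1 := by
  simp [pvBRow]

theorem pvBRow_getD (r : List Char) (g : List Int) (c : Char) (j : Nat) (hj : j ≤ r.length) :
    (pvBRow r g c).getD j 0 =
      match List.findIdx? (fun d => d == c) (r.drop j) with
      | none => g.getD j 0
      | some q => max (g.getD j 0) (1 + g.getD (j + q + 1) 0) := by
  unfold pvBRow
  exact pv_getD_map_range _ _ _ (by omega)

theorem pvBRow_MC (r : List Char) (t : List Char) (g : List Int)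
    (hg : ∀ j : Nat, j ≤ r.length → pvMC t (r.drop j) (g.getD j 0)) (c : Char) :
    ∀ j : Nat, j ≤ r.length → pvMC (c :: t) (r.drop j) ((pvBRow r g c).getD j 0) := by
  intro j hj
  rw [pvBRow_getD r g c j hj]
  cases hfi : List.findIdx? (fun d => d == c) (r.drop j) with
  | none =>
    have hc : c ∉ r.drop j := by
      intro hmem
      have := List.findIdx?_eq_none_iff.mp hfi c hmem
      simp at this
    exact pvMC_cons_notmem hc (hg j hj)
  | some q =>
    obtain ⟨hqlt, hq1, hq2⟩ := List.findIdx?_eq_some_iff_getElem.mp hfi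
    have hceq : (r.drop j)[q] = c := by simpa using hq1
    have hdrop2 : (r.drop j).drop (q + 1) = r.drop (j + q + 1) := by
      rw [List.drop_drop]; congr 1
    have hdec : r.drop j = (r.drop j).take q ++ c :: r.drop (j + q + 1) := by
      conv_lhs => rw [← List.take_append_drop q (r.drop j)]
      rw [List.drop_eq_getElem_cons hqlt, hceq, hdrop2]
    have hnot : c ∉ (r.drop j).take q := by
      intro hmem
      obtain ⟨i, hi, hival⟩ := List.mem_iff_getElem.mp hmem
      have hilt : i < q := by simp at hi; omega
      have : (r.drop j)[i]'(by omega) = c := by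
        rw [← hival, List.getElem_take]
      exact hq2 i hilt (by simp [this])
    have hA := hg j hj
    have hB := hg (j + q + 1) (by simp only [List.length_drop] at hqlt; omega)
    rw [hdec] at hA ⊢
    exact pvMC_cons_first hnot hA hB

theorem pvBTab_MC (r : List Char) :
    ∀ (t : List Char) (j : Nat), j ≤ r.length →
      pvMC t (r.drop j)
        ((t.foldr (fun c g => pvBRow r g c) (List.replicate (r.length + 1) 0)).getD j 0) := by
  intro t
  induction t with
  | nil =>
    intro j hj
    rw [List.foldr_nil]
    have hz : (List.replicate (r.length + 1) (0 : Int)).getD j 0 = 0 := by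
      rw [List.getD_eq_getElem _ _ (by simpa using by omega : j < (List.replicate (r.length + 1) (0 : Int)).length)]
      simp
    rw [hz]
    exact pvMC_nil_left _
  | cons c t ih =>
    intro j hj
    rw [List.foldr_cons]
    exact pvBRow_MC r t _ (fun j hj => ih j hj) c j hj
-- ===== bridge: B's inner backward scan builds exactly pvBRow =====
theorem pvB_inner_go (r : List Char) (g : List Int) (c : Char) (N : Nat) (hrN : r.length = N) :
    ∀ j0 : Nat, j0 ≤ N →
    (PySem.List.pyRange ((j0 : Int) - 1) (-1) (-1)).foldl
      (fun (st : List Int × Option Int) j =>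
        let p : Option Int := if PySem.List.pyGetD r j ' ' == c then some j else st.2
        let best : Int := PySem.List.pyGetD g j 0
        let best : Int :=
          match p with
          | some pp =>
              if 1 + PySem.List.pyGetD g (pp + 1) 0 > best then 1 + PySem.List.pyGetD g (pp + 1) 0
              else best
          | none => best
        (PySem.List.pySetD st.1 j best, p))
      (List.replicate j0 (0 : Int) ++ (pvBRow r g c).drop j0,
        (List.findIdx? (fun d => d == c) (r.drop j0)).map (fun q => ((j0 + q : Nat) : Int)))
    = (pvBRow r g c,
        (List.findIdx? (fun d => d == c) r).map (fun q => ((q : Nat) : Int))) := by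
  intro j0
  induction j0 with
  | zero =>
    intro _
    rw [show ((0 : Nat) : Int) - 1 = -1 by norm_num,
      PySem.List.pyRange_neg_one_eq_nil (by norm_num), List.foldl_nil]
    simp only [List.replicate_zero, List.nil_append, List.drop_zero, Nat.zero_add]
  | succ j0 ih =>
    intro hj
    have hj0N : j0 < N := by omega
    have hj0r : j0 < r.length := by omega
    rw [show (((j0 + 1 : Nat)) : Int) - 1 = ((j0 : Nat) : Int) by push_cast; ring,
      PySem.List.pyRange_neg_one_cons (by omega : (-1 : Int) < ((j0 : Nat) : Int)),
      List.foldl_cons]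
    have hFlen : (pvBRow r g c).length = N + 1 := by rw [pvBRow_length, hrN]
    have hrj : PySem.List.pyGetD r ((j0 : Nat) : Int) ' ' = r[j0] := by
      rw [PySem.List.pyGetD_natCast, List.getD_eq_getElem _ _ hj0r]
    have hdropj : r.drop j0 = r[j0] :: r.drop (j0 + 1) := List.drop_eq_getElem_cons hj0r
    -- the updated first-occurrence pointer
    have hp : (if PySem.List.pyGetD r ((j0 : Nat) : Int) ' ' == c then some ((j0 : Nat) : Int)
          else (List.findIdx? (fun d => d == c) (r.drop (j0 + 1))).map
            (fun q => (((j0 + 1 : Nat) + q : Nat) : Int)))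
        = (List.findIdx? (fun d => d == c) (r.drop j0)).map (fun q => ((j0 + q : Nat) : Int)) := by
      rw [hrj, hdropj, List.findIdx?_cons]
      by_cases hcc : (r[j0] == c) = true
      · rw [if_pos hcc, if_pos hcc]
        simp
      · rw [if_neg hcc, if_neg hcc, Option.map_map]
        cases List.findIdx? (fun d => d == c) (r.drop (j0 + 1)) with
        | none => rfl
        | some q =>
          simp only [Option.map_some, Function.comp_apply]
          congr 1
          push_cast; ring
    rw [hp]
    -- the computed cell value is pvBRow's entry at j0
    have hbest : (match (List.findIdx? (fun d => d == c) (r.drop j0)).map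
            (fun q => ((j0 + q : Nat) : Int)) with
          | some pp =>
              if 1 + PySem.List.pyGetD g (pp + 1) 0 > PySem.List.pyGetD g ((j0 : Nat) : Int) 0 then
                1 + PySem.List.pyGetD g (pp + 1) 0
              else PySem.List.pyGetD g ((j0 : Nat) : Int) 0
          | none => PySem.List.pyGetD g ((j0 : Nat) : Int) 0)
        = (pvBRow r g c).getD j0 0 := by
      rw [pvBRow_getD r g c j0 (by omega)]
      cases hfi : List.findIdx? (fun d => d == c) (r.drop j0) with
      | none => simp [PySem.List.pyGetD_natCast]
      | some q =>
        simp only [Option.map_some]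
        rw [show ((j0 + q : Nat) : Int) + 1 = ((j0 + q + 1 : Nat) : Int) by push_cast; ring,
          PySem.List.pyGetD_natCast, PySem.List.pyGetD_natCast]
        by_cases hle : 1 + g.getD (j0 + q + 1) 0 ≤ g.getD j0 0
        · rw [if_neg (by omega), max_eq_left hle]
        · rw [if_pos (by omega), max_eq_right (by omega)]
    -- writing the cell turns the state into the j0 state
    have hset : PySem.List.pySetD (List.replicate (j0 + 1) (0 : Int) ++ (pvBRow r g c).drop (j0 + 1))
          ((j0 : Nat) : Int) ((pvBRow r g c).getD j0 0)
        = List.replicate j0 (0 : Int) ++ (pvBRow r g c).drop j0 := by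
      rw [PySem.List.pySetD_natCast, List.replicate_succ']
      have h1 := pv_set_append (List.replicate j0 (0 : Int)) (0 : Int)
        ((pvBRow r g c).drop (j0 + 1)) ((pvBRow r g c).getD j0 0)
      rw [List.length_replicate] at h1
      rw [List.append_assoc, List.singleton_append, h1]
      congr 1
      rw [List.getD_eq_getElem _ _ (by omega)]
      exact (List.drop_eq_getElem_cons (by omega)).symm
    simp only [hbest, hset]
    exact ih (le_of_lt hj0N)

-- pvBRow keeps the last (sentinel) entry
theorem pvBRow_getD_last (r : List Char) (g : List Int) (c : Char) :
    (pvBRow r g c).getD r.length 0 = g.getD r.length 0 := by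
  rw [pvBRow_getD r g c r.length le_rfl, List.drop_length, List.findIdx?_nil]

theorem pvB_foldr_last (r : List Char) :
    ∀ (t : List Char) (g : List Int), g.getD r.length 0 = 0 →
      (t.foldr (fun c g => pvBRow r g c) g).getD r.length 0 = 0 := by
  intro t
  induction t with
  | nil => intro g hg; simpa using hg
  | cons c t ih =>
    intro g hg
    rw [List.foldr_cons, pvBRow_getD_last]
    exact ih g hg

-- B's whole character loop, with its literal body, is the fold of pvBRow.
theorem pvB_outer (r : List Char) (N : Nat) (hrN : r.length = N) :
    ∀ (t : List Char) (g : List Int), g.getD N 0 = 0 →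
    t.foldr (fun c g =>
      ((PySem.List.pyRange ((N : Int) - 1) (-1) (-1)).foldl
        (fun (st : List Int × Option Int) j =>
          let p : Option Int := if PySem.List.pyGetD r j ' ' == c then some j else st.2
          let best : Int := PySem.List.pyGetD g j 0
          let best : Int :=
            match p with
            | some pp =>
                if 1 + PySem.List.pyGetD g (pp + 1) 0 > best then 1 + PySem.List.pyGetD g (pp + 1) 0
                else best
            | none => best
          (PySem.List.pySetD st.1 j best, p))
        (List.replicate (N + 1) (0 : Int), none)).1) g
    = t.foldr (fun c g => pvBRow r g c) g := by
  intro t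
  induction t with
  | nil => intro g _; rfl
  | cons c t ih =>
    intro g hg
    rw [List.foldr_cons, List.foldr_cons, ih g hg]
    set g' := t.foldr (fun c g => pvBRow r g c) g with hg'
    have hg'N : g'.getD N 0 = 0 := by
      rw [hg', ← hrN] at *
      exact pvB_foldr_last r t g (by rw [hrN]; exact hg)
    have hFN : (pvBRow r g' c).getD N 0 = 0 := by
      rw [← hrN, pvBRow_getD_last, hrN]; exact hg'N
    have hinit : (List.replicate (N + 1) (0 : Int), (none : Option Int))
        = (List.replicate N (0 : Int) ++ (pvBRow r g' c).drop N,
           (List.findIdx? (fun d => d == c) (r.drop N)).map (fun q => ((N + q : Nat) : Int))) := by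
      rw [Prod.mk.injEq]
      refine ⟨?_, ?_⟩
      · rw [List.replicate_succ']
        congr 1
        have hlen : (pvBRow r g' c).length = N + 1 := by rw [pvBRow_length, hrN]
        rw [List.drop_eq_getElem_cons (by omega), List.drop_eq_nil_of_le (by omega)]
        have : (pvBRow r g' c)[N] = (pvBRow r g' c).getD N 0 := by
          rw [List.getD_eq_getElem _ _ (by omega)]
        rw [this, hFN]
      · rw [← hrN, List.drop_length, List.findIdx?_nil]
        rfl
    have h := pvB_inner_go r g' c N hrN N le_rfl
    rw [show ((N : Nat) : Int) = (N : Int) from rfl] at h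
    rw [hinit]
    rw [h]
-- ===== VERDICT (by name: the statement is the Claim_ definition above) =====
theorem kPalindrome_spec : Claim_equal_kPalindrome := by
  intro str n k hdom hpre
  obtain ⟨hn0, hnle⟩ := hpre
  obtain ⟨N, rfl⟩ : ∃ N : Nat, n = (N : Int) := ⟨n.toNat, (Int.toNat_of_nonneg hn0).symm⟩
  have hNle : N ≤ str.toList.length := by exact_mod_cast hnle
  show kPalindrome str (N : Int) k = kPalindrome_alt str (N : Int) k
  simp only [kPalindrome, kPalindrome_alt]
  set RV : List Char := (PySem.List.slice? str.toList none none (-1)).getD [] with hRV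
  have hRrev : RV = str.toList.reverse := by
    rw [hRV, PySem.List.slice?_none_none_neg_one]
    rfl
  have htlen : (str.toList.take N).length = N := by rw [List.length_take]; omega
  have hrlen : (RV.take N).length = N := by
    rw [hRrev, List.length_take, List.length_reverse]; omega
  have hct : ∀ j : Nat, j < N →
      PySem.List.pyGetD str.toList (j : Int) ' ' = (str.toList.take N).getD j ' ' := by
    intro j hj
    rw [PySem.List.pyGetD_natCast, pv_getD_take _ _ _ _ hj]
  have hrev : ∀ j : Nat, j < N →
      PySem.List.pyGetD RV (j : Int) ' ' = (RV.take N).getD j ' ' := by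
    intro j hj
    rw [PySem.List.pyGetD_natCast, pv_getD_take _ _ _ _ hj]
  simp only [PySem.List.slice_to_natCast, PySem.List.pyRepeat_singleton,
    show (((N : Int) + 1)).toNat = N + 1 by omega]
  rw [List.map_const', PySem.List.length_pyRange_one,
    show (((N : Int) + 1) - 0).toNat = N + 1 by omega]
  rw [pvA_outer0 str.toList RV (RV.take N) (str.toList.take N) N hrlen htlen hct hrev]
  -- the A-side corner entry
  have hdpN : PySem.List.pyGetD
      ((List.range (N + 1)).map
        (fun i => ((str.toList.take N).take i).foldl (pvStep (RV.take N))
          (List.replicate (N + 1) (0 : Int)))) ((N : Int)) []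
      = (str.toList.take N).foldl (pvStep (RV.take N)) (List.replicate (N + 1) (0 : Int)) := by
    rw [PySem.List.pyGetD_natCast, List.getD_eq_getElem _ _ (by simp)]
    simp [List.take_of_length_le (le_of_eq htlen)]
  rw [hdpN]
  -- the B-side: reversed iteration is a foldr, its rows are pvBRow
  have hxrev : (PySem.List.slice? (str.toList.take N) none none (-1)).getD []
      = (str.toList.take N).reverse := by
    rw [PySem.List.slice?_none_none_neg_one]
    rfl
  rw [hxrev, List.foldl_reverse]
  rw [pvB_outer (RV.take N) N hrlen (str.toList.take N) (List.replicate (N + 1) (0 : Int))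
    (by rw [List.getD_eq_getElem _ _ (by simp), List.getElem_replicate])]
  -- both corner values are the maximum common subsequence length of the same two lists
  have hA := pvA_MC (RV.take N) (str.toList.take N)
  rw [hrlen] at hA
  have hB := pvBTab_MC (RV.take N) (str.toList.take N) 0 (Nat.zero_le _)
  rw [List.drop_zero] at hB
  rw [hrlen] at hB
  have hval : ((str.toList.take N).foldl (pvStep (RV.take N))
        (List.replicate (N + 1) (0 : Int))).getD N 0
      = ((str.toList.take N).foldr (fun c g => pvBRow (RV.take N) g c)
        (List.replicate (N + 1) (0 : Int))).getD 0 0 := pvMC_unique hA hB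
  rw [PySem.List.pyGetD_natCast, show (0 : Int) = ((0 : Nat) : Int) from rfl,
    PySem.List.pyGetD_natCast]
  simp only [Nat.cast_zero]
  rw [hval]
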